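-- pv_equiv track=rewrite | github.com/MrBrantCode/unitest_baseline | mut_generate/mist_train_cf/cf_61364/solution.py | count_integers
-- ===== SOURCE A (Python) =====
-- from typing import List, Tuple
--
-- def count_integers(arr: List[List[int]]) -> Tuple[int, int]:
--     total = 0
--     distinct = set()
--     for sublist in arr:
--         for num in sublist:
--             total += 1
--             distinct.add(num)
--     return total, len(distinct)
-- ===== SOURCE B (Python) =====
-- from typing import List, Tuple
--
-- def count_integers(arr: List[List[int]]) -> Tuple[int, int]:
--     flat = sorted(x for sub in arr for x in sub)
--     total = len(flat)
--     distinct = sum(1 for a, b in zip(flat, flat[1:]) if a != b) + (1 if flat else 0)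
--     return total, distinct
-- ===== Notes on version B (the rewrite author's own statement) =====
-- stated objective: alternative
-- what changed: Replaces A's hash-set accumulation in a fused double loop by a sort-then-scan algorithm: flatten and sort the elements, take total as the sorted list's length, and count distinct values as the number of adjacent unequal pairs plus one (for a nonempty list).
import Mathlib
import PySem

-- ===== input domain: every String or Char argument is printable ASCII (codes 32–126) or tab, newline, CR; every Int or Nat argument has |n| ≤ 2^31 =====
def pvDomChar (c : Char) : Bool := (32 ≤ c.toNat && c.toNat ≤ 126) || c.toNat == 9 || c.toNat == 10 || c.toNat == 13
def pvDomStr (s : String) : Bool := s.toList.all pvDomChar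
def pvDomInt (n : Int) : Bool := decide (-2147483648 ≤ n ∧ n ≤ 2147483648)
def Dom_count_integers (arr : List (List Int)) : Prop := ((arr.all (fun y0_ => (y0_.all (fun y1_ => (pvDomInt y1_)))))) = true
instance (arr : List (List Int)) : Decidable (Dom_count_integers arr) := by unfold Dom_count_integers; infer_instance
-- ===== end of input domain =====

-- B replaces A's hash-set accumulation by a sort-then-scan: flatten & sort once, total = length,
-- distinct = adjacent unequal pairs + 1 (nonempty); objective: alternative algorithm.
-- ===== PORT A =====
def count_integers (arr : List (List Int)) : Int × Int :=
  let st := arr.foldl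
    (fun (st : Int × PySem.Set Int) sublist =>
      sublist.foldl (fun (st : Int × PySem.Set Int) num => (st.1 + 1, PySem.Set.add st.2 num)) st)
    ((0 : Int), PySem.Set.empty)
  (st.1, (PySem.Set.len st.2 : Int))

-- ===== PORT B =====
-- flat = sorted(x for sub in arr for x in sub); flat[1:] is flat.tail (exact: drop 1)
def count_integers_alt (arr : List (List Int)) : Int × Int :=
  let flat := PySem.List.sorted (arr.flatMap (fun sub => sub)) (fun x => x) false
  let total : Int := (flat.length : Int)
  let distinct : Int :=
    ((flat.zip flat.tail).map (fun p => if p.1 ≠ p.2 then (1 : Int) else 0)).sum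
      + (if flat = [] then 0 else 1)
  (total, distinct)

-- ===== PRECONDITION & SPEC =====
def Spec_count_integers (arr : List (List Int)) (out : Int × Int) : Prop := out = count_integers_alt arr
instance (arr : List (List Int)) (out : Int × Int) : Decidable (Spec_count_integers arr out) := by unfold Spec_count_integers; infer_instance

-- ===== CLAIM (what is proved, stated in full; the proofs are below) =====
def Claim_equal_count_integers : Prop := ∀ (arr : List (List Int)), Dom_count_integers arr → Spec_count_integers arr (count_integers arr)

-- ===== LEMMAS AND PROOFS =====

-- A's fused double loop, unrolled: total = flat length, set = Set.ofList of the flattened list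
lemma a_inner_fold (sub : List Int) (t : Int) (s : PySem.Set Int) :
    sub.foldl (fun (st : Int × PySem.Set Int) num => (st.1 + 1, PySem.Set.add st.2 num)) (t, s)
      = (t + (sub.length : Int), sub.foldl PySem.Set.add s) := by
  induction sub generalizing t s with
  | nil => simp
  | cons x xs ih => simp [List.foldl, ih]; ring

lemma a_outer_fold (arr : List (List Int)) (t : Int) (s : PySem.Set Int) :
    arr.foldl
      (fun (st : Int × PySem.Set Int) sublist =>
        sublist.foldl (fun (st : Int × PySem.Set Int) num => (st.1 + 1, PySem.Set.add st.2 num)) st)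
      (t, s)
      = (t + ((arr.flatMap (fun sub => sub)).length : Int),
         (arr.flatMap (fun sub => sub)).foldl PySem.Set.add s) := by
  induction arr generalizing t s with
  | nil => simp
  | cons sub rest ih =>
      simp [List.foldl, a_inner_fold, ih, List.foldl_append]
      ring

-- the size of set(xs) is the number of distinct elements of xs
lemma len_ofList_eq_card (xs : List Int) :
    (PySem.Set.ofList xs).length = xs.toFinset.card := by
  have hnd : (PySem.Set.ofList xs).Nodup := PySem.Set.nodup_ofList xs
  have hfs : (PySem.Set.ofList xs).toFinset = xs.toFinset := by
    ext a; simp [List.mem_toFinset, PySem.Set.mem_ofList]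
  rw [← hfs, List.toFinset_card_of_nodup hnd]

-- scan of a ≤-sorted list: adjacent unequal pairs + (nonempty) = number of distinct values
lemma scan_sorted_count (ys : List Int) (h : ys.Pairwise (· ≤ ·)) :
    ((ys.zip ys.tail).map (fun p => if p.1 ≠ p.2 then (1 : Int) else 0)).sum
      + (if ys = [] then 0 else 1) = (ys.toFinset.card : Int) := by
  induction ys with
  | nil => simp
  | cons a t ih =>
      cases t with
      | nil => simp
      | cons b t' =>
          have h' : (b :: t').Pairwise (· ≤ ·) := h.tail
          have ih' := ih h'
          by_cases hab : a = b
          · subst hab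
            have : (a :: a :: t').toFinset = (a :: t').toFinset := by
              ext x; simp
            rw [this]
            simp only [List.tail_cons, List.zip_cons_cons, List.map_cons, List.sum_cons] at *
            simp only [ne_eq, not_true_eq_false, if_false, if_neg (by simp : ¬(a :: t' = [])),
              if_neg (by simp : ¬(a :: a :: t' = []))] at *
            simpa using ih'
          · have hle : ∀ x ∈ b :: t', a ≤ x := by
              intro x hx
              exact (List.pairwise_cons.mp h).1 x hx
            have hnotmem : a ∉ b :: t' := by
              intro hmem
              rcases List.mem_cons.mp hmem with heq | hmem'
              · exact hab heq
              · have h1 : a ≤ b := hle b (by simp)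
                have h2 : b ≤ a := (List.pairwise_cons.mp h').1 a hmem'
                exact hab (le_antisymm h1 h2)
            have hcard : (a :: b :: t').toFinset.card = (b :: t').toFinset.card + 1 := by
              simp only [List.toFinset_cons]
              rw [Finset.card_insert_of_notMem (by simpa using hnotmem)]
            rw [hcard]
            simp only [List.tail_cons, List.zip_cons_cons, List.map_cons, List.sum_cons] at *
            simp only [ne_eq, if_pos hab, if_neg (by simp : ¬(a :: b :: t' = [])),
              if_neg (by simp : ¬(b :: t' = []))] at *
            push_cast
            linarith

-- ===== VERDICT (by name: the statement is the Claim_ definition above) =====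
theorem count_integers_spec : Claim_equal_count_integers := by
  intro arr _
  unfold Spec_count_integers count_integers count_integers_alt
  simp only [a_outer_fold, zero_add]
  set flatA := arr.flatMap (fun sub => sub) with hflat
  set ys := PySem.List.sorted flatA (fun x => x) false with hys
  have hperm : ys.Perm flatA := PySem.List.sorted_perm flatA (fun x => x) false
  have hlen : ys.length = flatA.length := hperm.length_eq
  have hsortedp : ys.Pairwise (· ≤ ·) := by
    simpa using PySem.List.sorted_pairwise flatA (fun x => x)
  have hfin : ys.toFinset = flatA.toFinset := List.toFinset_eq_of_perm _ _ hperm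
  have hset : flatA.foldl PySem.Set.add PySem.Set.empty = PySem.Set.ofList flatA := by
    rw [PySem.Set.ofList_eq_foldl]; rfl
  have hdist := scan_sorted_count ys hsortedp
  rw [hfin] at hdist
  refine Prod.ext ?_ ?_
  · show (flatA.length : Int) = (ys.length : Int)
    exact_mod_cast hlen.symm
  · show (PySem.Set.len (flatA.foldl PySem.Set.add PySem.Set.empty) : Int) = _
    rw [hset]
    show ((PySem.Set.ofList flatA).length : Int) = _
    rw [len_ofList_eq_card]
    exact hdist.symm
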